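-- pv_equiv track=rewrite | github.com/MrBrantCode/unitest_baseline | mut_generate/mist_train_cf/cf_76347/solution.py | interchange_lists
-- ===== SOURCE A (Python) =====
-- def interchange_lists(list1, list2):
--     len1 = len(list1)
--     len2 = len(list2)
--
--     # Interchange elements
--     for i in range(min(len1, len2)):
--         list1[i], list2[i] = list2[i], list1[i]
--
--     # If lengths are not equal, append the remaining elements of the longer list to the shorter one
--     if len1 < len2:
--         list1.extend(list2[len1:])
--     elif len1 > len2:
--         list2.extend(list1[len2:])
--
--     return list1, list2
-- ===== SOURCE B (Python) =====
-- def interchange_lists(list1, list2):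
--     # Closed form: compute both results from the original contents, then
--     # overwrite in place (preserving object identity, like A's mutation).
--     list1[:], list2[:] = (list2 + list1[len(list2):],
--                           list1 + list2[len(list1):])
--     return list1, list2
-- ===== Notes on version B (the rewrite author's own statement) =====
-- stated objective: simpler
-- what changed: Replaces the per-index swap loop plus two extend branches with a closed form: new list1 = list2 + list1[len(list2):] and new list2 = list1 + list2[len(list1):], computed from the original contents and assigned at once via slice assignment.
import Mathlib
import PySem

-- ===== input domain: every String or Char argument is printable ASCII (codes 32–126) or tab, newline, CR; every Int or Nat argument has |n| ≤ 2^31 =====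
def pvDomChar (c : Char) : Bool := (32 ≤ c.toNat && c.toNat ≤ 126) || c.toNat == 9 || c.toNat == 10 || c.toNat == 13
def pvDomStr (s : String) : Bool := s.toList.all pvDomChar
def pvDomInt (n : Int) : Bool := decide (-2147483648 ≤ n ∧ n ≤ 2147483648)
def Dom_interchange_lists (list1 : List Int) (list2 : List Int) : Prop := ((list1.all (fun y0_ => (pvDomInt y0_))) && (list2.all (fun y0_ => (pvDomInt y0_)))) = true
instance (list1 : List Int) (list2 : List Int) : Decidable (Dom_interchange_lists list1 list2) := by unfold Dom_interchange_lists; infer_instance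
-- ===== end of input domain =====

-- B replaces A's per-index swap loop and extend branches with a closed-form
-- concatenation of the original contents (simpler); both A and B mutate their
-- arguments in place in Python, and the equivalence proved is about the return value.


-- ===== PORT A =====
-- one iteration of A's swap loop: list1[i], list2[i] = list2[i], list1[i]
def pvSwapStep (p : List Int × List Int) (i : Nat) : List Int × List Int :=
  (p.1.set i (p.2.getD i 0), p.2.set i (p.1.getD i 0))

def interchange_lists (list1 : List Int) (list2 : List Int) : List Int × List Int :=
  let len1 := list1.length
  let len2 := list2.length
  let p := (List.range (min len1 len2)).foldl pvSwapStep (list1, list2)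
  if len1 < len2 then (p.1 ++ p.2.drop len1, p.2)
  else if len2 < len1 then (p.1, p.2 ++ p.1.drop len2)
  else p

-- ===== PORT B =====
def interchange_lists_alt (list1 : List Int) (list2 : List Int) : List Int × List Int :=
  (list2 ++ list1.drop list2.length, list1 ++ list2.drop list1.length)

-- ===== PRECONDITION & SPEC =====
def Spec_interchange_lists (list1 : List Int) (list2 : List Int) (out : List Int × List Int) : Prop := out = interchange_lists_alt list1 list2
instance (list1 : List Int) (list2 : List Int) (out : List Int × List Int) : Decidable (Spec_interchange_lists list1 list2 out) := by unfold Spec_interchange_lists; infer_instance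

-- ===== CLAIM (what is proved, stated in full; the proofs are below) =====
def Claim_equal_interchange_lists : Prop := ∀ (list1 : List Int) (list2 : List Int), Dom_interchange_lists list1 list2 → Spec_interchange_lists list1 list2 (interchange_lists list1 list2)

-- ===== LEMMAS AND PROOFS =====

theorem pvGetD_mid (a b : List Int) (k : Nat) (ha : k ≤ a.length) (hb : k < b.length) :
    (a.take k ++ b.drop k).getD k 0 = b[k] := by
  rw [List.getD_eq_getElem?_getD,
    List.getElem?_append_right (by simp [List.length_take])]
  simp [List.length_take, Nat.min_eq_left ha, List.getElem?_drop,
    List.getElem?_eq_getElem hb]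

theorem pvSet_mid (a b : List Int) (k : Nat) (x : Int) (ha : k ≤ a.length) (hb : k < b.length) :
    (a.take k ++ b.drop k).set k x = a.take k ++ (x :: b.drop (k + 1)) := by
  rw [List.set_append_right _ _ (by simp [List.length_take])]
  have h0 : k - (a.take k).length = 0 := by simp [List.length_take]; omega
  rw [h0, List.drop_eq_getElem_cons hb, List.set_cons_zero]

theorem pvTake_snoc (b : List Int) (k : Nat) (hb : k < b.length) :
    b.take k ++ [b[k]] = b.take (k + 1) := by
  rw [List.take_add_one, List.getElem?_eq_getElem hb]
  rfl

-- invariant of A's swap loop: after k steps the first k positions are exchanged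
theorem pvSwapFold (l1 l2 : List Int) (k : Nat) (hk : k ≤ min l1.length l2.length) :
    (List.range k).foldl pvSwapStep (l1, l2)
      = (l2.take k ++ l1.drop k, l1.take k ++ l2.drop k) := by
  induction k with
  | zero => simp
  | succ k ih =>
    have h1 : k < l1.length := by omega
    have h2 : k < l2.length := by omega
    rw [List.range_succ, List.foldl_append, ih (by omega)]
    simp only [List.foldl_cons, List.foldl_nil, pvSwapStep]
    rw [pvGetD_mid l1 l2 k (le_of_lt h1) h2, pvGetD_mid l2 l1 k (le_of_lt h2) h1,
      pvSet_mid l2 l1 k _ (le_of_lt h2) h1, pvSet_mid l1 l2 k _ (le_of_lt h1) h2]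
    have hsnoc : ∀ (b c : List Int) (hb : k < b.length), b.take k ++ b[k] :: c = b.take (k+1) ++ c := by
      intro b c hb
      rw [← pvTake_snoc b k hb, List.append_assoc, List.singleton_append]
    rw [hsnoc l2 (l1.drop (k+1)) h2, hsnoc l1 (l2.drop (k+1)) h1]

-- ===== VERDICT (by name: the statement is the Claim_ definition above) =====
theorem interchange_lists_spec : Claim_equal_interchange_lists := by
  intro l1 l2 _
  unfold Spec_interchange_lists interchange_lists interchange_lists_alt
  simp only
  rcases Nat.lt_trichotomy l1.length l2.length with h | h | h
  · have hm : min l1.length l2.length = l1.length := by omega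
    rw [hm, pvSwapFold l1 l2 l1.length (by omega), if_pos h]
    have e1 : l1.drop l1.length = [] := by simp
    have e2 : l1.take l1.length = l1 := by simp
    have e3 : l1.drop l2.length = [] := List.drop_eq_nil_of_le (le_of_lt h)
    rw [e1, e2, e3]
    have e4 : (l1 ++ l2.drop l1.length).drop l1.length = l2.drop l1.length := by
      rw [show l1.length = l1.length + 0 by omega]
      simp
    rw [e4]
    simp
  · have hm : min l1.length l2.length = l1.length := by omega
    rw [hm, pvSwapFold l1 l2 l1.length (by omega)]
    rw [if_neg (by omega), if_neg (by omega)]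
    have e3 : l1.drop l2.length = [] := List.drop_eq_nil_of_le h.le
    have e4 : l2.drop l1.length = [] := List.drop_eq_nil_of_le h.ge
    simp [e3, h]
  · have hm : min l1.length l2.length = l2.length := by omega
    rw [hm, pvSwapFold l1 l2 l2.length (by omega)]
    rw [if_neg (by omega), if_pos h]
    have e1 : l2.drop l2.length = [] := by simp
    have e2 : l2.take l2.length = l2 := by simp
    have e3 : l2.drop l1.length = [] := List.drop_eq_nil_of_le (le_of_lt h)
    rw [e1, e2, e3]
    have e4 : (l2 ++ l1.drop l2.length).drop l2.length = l1.drop l2.length := by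
      rw [show l2.length = l2.length + 0 by omega]
      simp
    rw [e4]
    simp
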